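-- pv_equiv track=rewrite | github.com/ChiHyeongCho/Algorithms | venv/네이버 2번.py | solution
-- ===== SOURCE A (Python) =====
-- from itertools import combinations
--
-- def solution(answer_sheet, sheets):
--
--     cont = list(combinations(sheets, 2))
--
--     answer = 0
--
--     for i in range(len(cont)):
--
--         a = cont[i][0]
--         b = cont[i][1]
--         check = [0]*len(answer_sheet)
--
--         num = 0
--         pro = 1
--         ma_pro = 1
--
--         for j in range(len(answer_sheet)):
--
--             if a[j] == b[j] and a[j] != answer_sheet[j]:
--                 num += 1
--                 check[j] = 1
--
--             if check[j] == 1: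
--                 if j > 0 and check[j-1] == 1:
--                     pro += 1
--                     if pro > ma_pro:
--                         ma_pro = pro
--
--             else:
--                 pro = 1
--
--         if num == 0:
--             ma_pro = 0
--
--         local = num + ma_pro*ma_pro
--
--         if local > answer:
--             answer = local
--
--     return answer
-- ===== SOURCE B (Python) =====
-- from itertools import combinations
--
--
-- def solution(answer_sheet, sheets):
--     best = 0
--     for a, b in combinations(sheets, 2):
--         # bit j of v is set iff a[j] == b[j] != answer_sheet[j]
--         v = 0
--         for j in reversed(range(len(answer_sheet))):
--             v = v << 1 | (a[j] == b[j] and a[j] != answer_sheet[j])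
--         num = v.bit_count()
--         # longest run of set bits: repeatedly AND with self shifted right
--         run = 0
--         w = v
--         while w:
--             w &= w >> 1
--             run += 1
--         best = max(best, num + run * run)
--     return best
-- ===== Notes on version B (the rewrite author's own statement) =====
-- stated objective: alternative
-- what changed: A's per-index scan with a check array and pro/ma_pro run counters is replaced by bit-parallel arithmetic: each pair's matches are packed into one integer bitmask, the count is its popcount, and the longest run of set bits is found by repeatedly AND-ing the mask with itself shifted right.
import Mathlib
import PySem

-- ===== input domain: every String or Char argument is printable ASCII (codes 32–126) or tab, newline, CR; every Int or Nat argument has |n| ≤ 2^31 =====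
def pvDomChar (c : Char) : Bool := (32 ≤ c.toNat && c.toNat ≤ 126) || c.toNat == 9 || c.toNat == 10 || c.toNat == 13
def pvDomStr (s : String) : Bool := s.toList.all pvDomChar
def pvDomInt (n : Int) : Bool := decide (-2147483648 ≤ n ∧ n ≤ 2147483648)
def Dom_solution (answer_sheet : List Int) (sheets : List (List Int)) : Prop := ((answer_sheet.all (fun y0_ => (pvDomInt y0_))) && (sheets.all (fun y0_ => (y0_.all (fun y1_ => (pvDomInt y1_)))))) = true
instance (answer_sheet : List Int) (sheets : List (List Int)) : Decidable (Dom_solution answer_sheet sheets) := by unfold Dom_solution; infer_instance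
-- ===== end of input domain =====

-- B replaces A's per-index scan with check array and pro/ma_pro run counters by bit-parallel
-- arithmetic: each pair's matches are packed into one integer bitmask, the count is its popcount,
-- and the longest run of set bits is found by repeatedly AND-ing the mask with itself shifted
-- (objective: alternative algorithm; same asymptotic cost).

-- ===== PORT A =====
-- A's inner loop body, named so the proofs can speak about it (a literal transcription of the
-- Python loop body; state = (check, num, pro, ma_pro)).  Indexing a[j], b[j], answer_sheet[j],
-- check[j], check[j-1] is in range under Pre_solution, so pyGetD/pySetD are exact there.
def pvStepA (answer_sheet a b : List Int) (s : List Int × Int × Int × Int) (j : Int) :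
    List Int × Int × Int × Int :=
  let check := s.1; let num := s.2.1; let pro := s.2.2.1; let ma_pro := s.2.2.2
  let hit : Bool := (PySem.List.pyGetD a j 0 == PySem.List.pyGetD b j 0)
      && !(PySem.List.pyGetD a j 0 == PySem.List.pyGetD answer_sheet j 0)
  let num := if hit then num + 1 else num
  let check := if hit then PySem.List.pySetD check j 1 else check
  if PySem.List.pyGetD check j 0 == 1 then
    if decide (j > 0) && (PySem.List.pyGetD check (j - 1) 0 == 1) then
      let pro := pro + 1
      (check, num, pro, if pro > ma_pro then pro else ma_pro)
    else (check, num, pro, ma_pro)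
  else (check, num, 1, ma_pro)

def solution (answer_sheet : List Int) (sheets : List (List Int)) : Int :=
  let cont := PySem.List.combinations sheets 2
  (PySem.List.pyRange 0 (cont.length : Int) 1).foldl (fun answer i =>
    let c := PySem.List.pyGetD cont i []
    let a := PySem.List.pyGetD c 0 []
    let b := PySem.List.pyGetD c 1 []
    let st := (PySem.List.pyRange 0 (answer_sheet.length : Int) 1).foldl
      (pvStepA answer_sheet a b)
      (List.replicate answer_sheet.length 0, 0, 1, 1)
    let ma_pro := if st.2.1 == 0 then 0 else st.2.2.2
    let loc := st.2.1 + ma_pro * ma_pro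
    if loc > answer then loc else answer) 0

-- ===== PORT B =====
-- v.bit_count() of a nonnegative Python int, ported by hand (binary recursion); exact on Nat.
def pvPop (v : Nat) : Nat :=
  if v = 0 then 0 else v % 2 + pvPop (v / 2)
  termination_by v
  decreasing_by exact Nat.div_lt_self (Nat.pos_of_ne_zero (by assumption)) (by norm_num)

-- the `while w: w &= w >> 1; run += 1` loop of Source B; exact on Nat.
def pvShrink (w : Nat) : Nat :=
  if h : w = 0 then 0 else pvShrink (w &&& (w >>> 1)) + 1
  termination_by w
  decreasing_by
    calc w &&& (w >>> 1) ≤ w >>> 1 := Nat.and_le_right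
      _ = w / 2 := Nat.shiftRight_one w
      _ < w := Nat.div_lt_self (Nat.pos_of_ne_zero h) (by norm_num)

-- Source B's loop body for one pair (a, b): pack the matches into a bitmask, then popcount + squared
-- length of the longest set-bit run (found by the shift-and-AND loop pvShrink)
def pvPairScoreB (answer_sheet a b : List Int) : Int :=
  -- for j in reversed(range(len(answer_sheet))): v = v << 1 | (a[j] == b[j] and a[j] != answer_sheet[j])
  let v := ((PySem.List.pyRange 0 (answer_sheet.length : Int) 1).reverse).foldl
    (fun v j => (v <<< 1) |||
      (if (PySem.List.pyGetD a j 0 == PySem.List.pyGetD b j 0)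
          && !(PySem.List.pyGetD a j 0 == PySem.List.pyGetD answer_sheet j 0)
       then 1 else 0)) 0
  let num : Int := (pvPop v : Int)
  let run : Int := (pvShrink v : Int)
  num + run * run

def solution_alt (answer_sheet : List Int) (sheets : List (List Int)) : Int :=
  (PySem.List.combinations sheets 2).foldl (fun best c =>
    let a := c.headD []
    let b := c.tail.headD []
    max best (pvPairScoreB answer_sheet a b)) 0

-- ===== PRECONDITION & SPEC =====
-- Pre_solution excludes exactly the inputs where A raises IndexError: when at least two sheets
-- exist (so some pair is scanned), every sheet must be at least as long as answer_sheet.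
def Pre_solution (answer_sheet : List Int) (sheets : List (List Int)) : Prop :=
  2 ≤ sheets.length → ∀ s ∈ sheets, answer_sheet.length ≤ s.length
instance (answer_sheet : List Int) (sheets : List (List Int)) : Decidable (Pre_solution answer_sheet sheets) := by unfold Pre_solution; infer_instance

def pvWitness_solution : List Int × List (List Int) := ([1, 2], [[1, 1], [1, 1], [2, 3]])

def Spec_solution (answer_sheet : List Int) (sheets : List (List Int)) (out : Int) : Prop := out = solution_alt answer_sheet sheets
instance (answer_sheet : List Int) (sheets : List (List Int)) (out : Int) : Decidable (Spec_solution answer_sheet sheets out) := by unfold Spec_solution; infer_instance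

-- ===== CLAIM (what is proved, stated in full; the proofs are below) =====
def Claim_equal_solution : Prop := ∀ (answer_sheet : List Int) (sheets : List (List Int)), Dom_solution answer_sheet sheets → Pre_solution answer_sheet sheets → Spec_solution answer_sheet sheets (solution answer_sheet sheets)

-- ===== LEMMAS AND PROOFS =====

-- the per-pair match mask, the common ground of the two ports
def pvMask (a b answer_sheet : List Int) : List Bool :=
  (a.zip (b.zip answer_sheet)).map (fun p => (p.1 == p.2.1) && !(p.1 == p.2.2))

-- ghost state machine for A's run scan: (current run length, best run length)
def pvStep (s : Int × Int) (x : Bool) : Int × Int :=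
  if x then (s.1 + 1, max s.2 (s.1 + 1)) else (0, s.2)

-- "max run, the first run credited with c extra": spec of all the run computations
def pvG : Int → List Bool → Int
  | _, [] => 0
  | c, true :: xs => max (c + 1) (pvG (c + 1) xs)
  | _, false :: xs => pvG 0 xs

-- Nat twin of pvG, used on the bitmask side
def pvGN : Nat → List Bool → Nat
  | _, [] => 0
  | c, true :: xs => max (c + 1) (pvGN (c + 1) xs)
  | _, false :: xs => pvGN 0 xs

-- number of Trues, as a Nat
def pvCnt : List Bool → Nat
  | [] => 0
  | x :: xs => (if x then 1 else 0) + pvCnt xs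

-- the integer whose bit j is m[j]
def pvEnc : List Bool → Nat
  | [] => 0
  | x :: xs => (if x then 1 else 0) + 2 * pvEnc xs

-- v has k consecutive set bits somewhere
def pvHasRun (v k : Nat) : Prop := ∃ j, ∀ i < k, v.testBit (j + i) = true

-- m, preceded by r phantom Trues, has a k-window of Trues whose last cell is past the phantom part
def pvHR (r : Nat) (m : List Bool) (k : Nat) : Prop :=
  ∃ j, r + 1 ≤ j + k ∧ ∀ i < k, (List.replicate r true ++ m).getD (j + i) false = true

lemma pvG_nonneg (m : List Bool) : ∀ c : Int, 0 ≤ c → 0 ≤ pvG c m := by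
  induction m with
  | nil => intro c _; simp [pvG]
  | cons x xs ih =>
    intro c hc
    cases x
    · simpa [pvG] using ih 0 le_rfl
    · have := ih (c + 1) (by omega); simp [pvG]; omega

lemma pvG_of_all_false (m : List Bool) (h : ∀ x ∈ m, x = false) : ∀ c, pvG c m = 0 := by
  induction m with
  | nil => intro c; simp [pvG]
  | cons x xs ih =>
    intro c
    have hx : x = false := h x (by simp)
    subst hx
    simp [pvG]
    exact ih (fun y hy => h y (by simp [hy])) 0

lemma pvG_pos_of_mem (m : List Bool) (h : true ∈ m) : ∀ c : Int, 0 ≤ c → 1 ≤ pvG c m := by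
  induction m with
  | nil => simp at h
  | cons x xs ih =>
    intro c hc
    cases x
    · have : true ∈ xs := by simpa using h
      simpa [pvG] using ih this 0 le_rfl
    · simp [pvG]; omega

lemma pvStep_foldl_best (m : List Bool) : ∀ c b : Int, 0 ≤ c → 0 ≤ b →
    (m.foldl pvStep (c, b)).2 = max b (pvG c m) := by
  induction m with
  | nil => intro c b _ hb; simp [pvG]; omega
  | cons x xs ih =>
    intro c b hc hb
    cases x
    · simp only [List.foldl_cons, pvStep, Bool.false_eq_true, if_false]
      rw [ih 0 b le_rfl hb]; simp [pvG]
    · simp only [List.foldl_cons, pvStep, if_true]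
      rw [ih (c + 1) _ (by omega) (by omega)]; simp only [pvG]; omega

lemma pvStep_foldl_carry_nonneg (m : List Bool) : ∀ c b : Int, 0 ≤ c →
    0 ≤ (m.foldl pvStep (c, b)).1 := by
  induction m with
  | nil => intro c b hc; simpa
  | cons x xs ih =>
    intro c b hc
    cases x
    · simpa [pvStep] using ih 0 b le_rfl
    · simpa [pvStep] using ih (c + 1) _ (by omega)

-- the counting fold: offset and positivity
lemma pvNum_from (m : List Bool) : ∀ s : Int,
    m.foldl (fun s x => s + (if x then (1 : Int) else 0)) s
      = s + m.foldl (fun s x => s + (if x then (1 : Int) else 0)) 0 := by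
  induction m with
  | nil => simp
  | cons x xs ih => intro s; simp only [List.foldl_cons]; rw [ih, ih (0 + _)]; omega

lemma pvNum_zero_iff (m : List Bool) :
    m.foldl (fun s x => s + (if x then (1 : Int) else 0)) 0 = 0 ↔ true ∉ m := by
  induction m with
  | nil => simp
  | cons x xs ih =>
    have hnn : 0 ≤ xs.foldl (fun s x => s + (if x then (1 : Int) else 0)) 0 := by
      clear ih
      induction xs with
      | nil => simp
      | cons y ys ihy => simp only [List.foldl_cons]; rw [pvNum_from]; split <;> omega
    simp only [List.foldl_cons]
    rw [pvNum_from]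
    cases x <;> simp [ih] <;> omega

lemma pvNumFold_cnt (m : List Bool) :
    m.foldl (fun s x => s + (if x then (1 : Int) else 0)) 0 = (pvCnt m : Int) := by
  induction m with
  | nil => simp [pvCnt]
  | cons x xs ih =>
    simp only [List.foldl_cons, pvCnt]
    rw [pvNum_from, ih]
    push_cast
    split <;> omega

-- ===== mask basics =====

lemma pvMask_length (a b ans : List Int) (ha : ans.length ≤ a.length) (hb : ans.length ≤ b.length) :
    (pvMask a b ans).length = ans.length := by
  simp [pvMask]; omega

lemma pvMask_getElem (a b ans : List Int) (ha : ans.length ≤ a.length) (hb : ans.length ≤ b.length)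
    (n : Nat) (hn : n < ans.length) :
    (pvMask a b ans)[n]'(by rw [pvMask_length a b ans ha hb]; exact hn)
      = ((a[n]'(by omega) == b[n]'(by omega)) && !(a[n]'(by omega) == ans[n]'hn)) := by
  simp [pvMask, List.getElem_zip]

-- ===== the inner-loop invariant of A =====

lemma pvInnerA_inv (ans a b : List Int) (ha : ans.length ≤ a.length) (hb : ans.length ≤ b.length) :
    ∀ n, n ≤ ans.length →
    (PySem.List.pyRange 0 (n : Int) 1).foldl (pvStepA ans a b)
        (List.replicate ans.length 0, 0, 1, 1)
      = (((pvMask a b ans).take n).map (fun x => if x then (1 : Int) else 0)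
            ++ List.replicate (ans.length - n) 0,
         ((pvMask a b ans).take n).foldl (fun s x => s + (if x then (1 : Int) else 0)) 0,
         max 1 (((pvMask a b ans).take n).foldl pvStep (0, 0)).1,
         max 1 (((pvMask a b ans).take n).foldl pvStep (0, 0)).2)
      ∧ ((((pvMask a b ans).take n).foldl pvStep (0, 0)).1 = 0
           ↔ ¬ (0 < n ∧ (pvMask a b ans).getD (n - 1) false = true)) := by
  have hm : (pvMask a b ans).length = ans.length := pvMask_length a b ans ha hb
  intro n
  induction n with
  | zero =>
    intro _
    constructor
    · simp [PySem.List.pyRange_zero]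
    · simp
  | succ k ih =>
    intro hk1
    have hk : k < ans.length := by omega
    have hkm : k < (pvMask a b ans).length := by omega
    obtain ⟨hfold, hiff⟩ := ih (by omega)
    -- unroll the range by one step
    have hrange : PySem.List.pyRange 0 ((k + 1 : Nat) : Int) 1
        = PySem.List.pyRange 0 (k : Int) 1 ++ [(k : Int)] := by
      have h := PySem.List.pyRange_one_succ_right (a := 0) (b := (k : Int)) (by positivity)
      push_cast
      exact h
    rw [hrange, List.foldl_append, hfold]
    simp only [List.foldl_cons, List.foldl_nil]
    -- the element processed this step
    have htake : (pvMask a b ans).take (k + 1)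
        = (pvMask a b ans).take k ++ [(pvMask a b ans)[k]] :=
      List.take_succ_eq_append_getElem hkm
    have hlen1 : (((pvMask a b ans).take k).map (fun x => if x then (1 : Int) else 0)).length = k := by
      simp; omega
    -- index computations
    have hga : PySem.List.pyGetD a (k : Int) 0 = a[k]'(by omega) := by
      simp [List.getElem?_eq_getElem (show k < a.length by omega)]
    have hgb : PySem.List.pyGetD b (k : Int) 0 = b[k]'(by omega) := by
      simp [List.getElem?_eq_getElem (show k < b.length by omega)]
    have hgans : PySem.List.pyGetD ans (k : Int) 0 = ans[k]'hk := by
      simp [List.getElem?_eq_getElem hk]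
    have hhit : ((PySem.List.pyGetD a (k : Int) 0 == PySem.List.pyGetD b (k : Int) 0)
        && !(PySem.List.pyGetD a (k : Int) 0 == PySem.List.pyGetD ans (k : Int) 0))
        = (pvMask a b ans)[k]'hkm := by
      rw [hga, hgb, hgans, pvMask_getElem a b ans ha hb k hk]
    -- abbreviations
    set C : List Int := ((pvMask a b ans).take k).map (fun x => if x then (1 : Int) else 0)
      ++ List.replicate (ans.length - k) 0 with hC
    have hClen : C.length = ans.length := by
      simp [hC]; omega
    have hCk : C.getD k 0 = 0 := by
      have h1 : k < C.length := by rw [hClen]; omega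
      rw [List.getD_eq_getElem C 0 h1]
      rw [List.getElem_append_right (by rw [hlen1])]
      simp
    have hCsetk : (C.set k 1).getD k 0 = 1 := by
      have h1 : k < (C.set k 1).length := by rw [List.length_set, hClen]; omega
      rw [List.getD_eq_getElem _ 0 h1]
      exact List.getElem_set_self _
    have hCprev : ∀ (jj : Nat) (hjj : jj < k),
        C.getD jj 0 = (if (pvMask a b ans)[jj]'(by omega) then (1 : Int) else 0) := by
      intro jj hjj
      have h1 : jj < C.length := by rw [hClen]; omega
      rw [List.getD_eq_getElem C 0 h1]
      rw [List.getElem_append_left (by rw [hlen1]; omega)]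
      simp [List.getElem_take]
    have hCsetprev : ∀ (jj : Nat) (hjj : jj < k),
        (C.set k 1).getD jj 0 = C.getD jj 0 := by
      intro jj hjj
      have h1 : jj < (C.set k 1).length := by rw [List.length_set, hClen]; omega
      have h2 : jj < C.length := by rw [hClen]; omega
      rw [List.getD_eq_getElem _ 0 h1, List.getD_eq_getElem C 0 h2]
      exact List.getElem_set_ne (l := C) (i := k) (j := jj) (a := 1) (by omega) (by simpa using h2)
    -- the new check array equals the (k+1)-prefix form
    have hnewfalse : (pvMask a b ans)[k]'hkm = false →
        C = ((pvMask a b ans).take (k + 1)).map (fun x => if x then (1 : Int) else 0)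
            ++ List.replicate (ans.length - (k + 1)) 0 := by
      intro hv
      have ht := htake
      rw [hv] at ht
      simp only [ht, List.map_append, List.append_assoc, List.map_cons, List.map_nil,
        Bool.false_eq_true, reduceIte]
      rw [hC]
      congr 1
      have : ans.length - k = (ans.length - (k + 1)) + 1 := by omega
      rw [this, List.replicate_succ]
      simp
    have hnewtrue : (pvMask a b ans)[k]'hkm = true →
        C.set k 1 = ((pvMask a b ans).take (k + 1)).map (fun x => if x then (1 : Int) else 0)
            ++ List.replicate (ans.length - (k + 1)) 0 := by
      intro hv
      have ht := htake
      rw [hv] at ht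
      simp only [ht, List.map_append, List.append_assoc, List.map_cons, List.map_nil,
        reduceIte]
      rw [hC]
      have hset : (((pvMask a b ans).take k).map (fun x : Bool => if x then (1 : Int) else 0)
            ++ List.replicate (ans.length - k) 0).set k 1
          = ((pvMask a b ans).take k).map (fun x : Bool => if x then (1 : Int) else 0)
            ++ (List.replicate (ans.length - k) 0).set 0 1 := by
        rw [List.set_append]
        simp [hlen1]
        have h0 : k - min k (pvMask a b ans).length = 0 := by omega
        rw [h0]
      rw [hset]
      congr 1
      have : ans.length - k = (ans.length - (k + 1)) + 1 := by omega
      rw [this, List.replicate_succ]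
      simp
    have hcrnn : 0 ≤ (((pvMask a b ans).take k).foldl pvStep (0, 0)).1 :=
      pvStep_foldl_carry_nonneg _ 0 0 le_rfl
    have hstep1 : (((pvMask a b ans).take (k + 1)).foldl pvStep (0, 0))
        = pvStep (((pvMask a b ans).take k).foldl pvStep (0, 0)) ((pvMask a b ans)[k]'hkm) := by
      rw [htake, List.foldl_append]
      simp
    have hnum1 : (((pvMask a b ans).take (k + 1)).foldl
          (fun s x => s + (if x then (1 : Int) else 0)) 0)
        = (((pvMask a b ans).take k).foldl (fun s x => s + (if x then (1 : Int) else 0)) 0)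
          + (if (pvMask a b ans)[k]'hkm then (1 : Int) else 0) := by
      rw [htake, List.foldl_append]
      simp
    have hgdk : (pvMask a b ans).getD (k + 1 - 1) false = (pvMask a b ans)[k]'hkm := by
      simpa using List.getD_eq_getElem (pvMask a b ans) false hkm
    rw [hstep1, hnum1, hgdk]
    cases hv : (pvMask a b ans)[k]'hkm with
    | false =>
      simp only [pvStep, Bool.false_eq_true, reduceIte]
      constructor
      · -- evaluate A's step
        simp only [pvStepA, hhit, hv, Bool.false_eq_true, reduceIte]
        have hCpg : (PySem.List.pyGetD C ((k : Nat) : Int) 0 == (1 : Int)) = false := by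
          simp only [PySem.List.pyGetD_natCast]
          rw [hCk]
          rfl
        rw [hCpg]
        simp only [Bool.false_eq_true, reduceIte, Prod.mk.injEq]
        refine ⟨hnewfalse hv, ?_, ?_, ?_⟩ <;> first | trivial | omega
      · simp
    | true =>
      simp only [pvStep, reduceIte]
      have hCpgset : (PySem.List.pyGetD (PySem.List.pySetD C ((k : Nat) : Int) 1)
          ((k : Nat) : Int) 0 == (1 : Int)) = true := by
        simp only [PySem.List.pySetD_natCast, PySem.List.pyGetD_natCast]
        rw [hCsetk]
        rfl
      constructor
      · -- evaluate A's step
        simp only [pvStepA, hhit, hv, reduceIte, hCpgset]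
        rcases Nat.eq_zero_or_pos k with hk0 | hkpos
        · -- k = 0: the `j > 0` test fails; the prefix scan carry is 0
          subst hk0
          have hdec : decide ((0 : Int) > 0) = false := by simp
          simp only [Nat.cast_zero, hdec, Bool.false_and, Bool.false_eq_true, reduceIte,
            Prod.mk.injEq, List.take_zero, List.foldl_nil]
          refine ⟨by rw [PySem.List.pySetD_of_nonneg C 1 (by norm_num)]; simpa using hnewtrue hv,
            ?_, ?_, ?_⟩ <;> first | trivial | omega
        · -- k ≥ 1: the previous cell holds m[k-1]
          have hdec : decide ((k : Int) > 0) = true := by simp; omega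
          have hcast : ((k : Int) - 1) = ((k - 1 : Nat) : Int) := by omega
          have hpgprev : (PySem.List.pyGetD (PySem.List.pySetD C ((k : Nat) : Int) 1)
              ((k : Int) - 1) 0 == (1 : Int))
              = (pvMask a b ans)[k - 1]'(by omega) := by
            rw [hcast]
            simp only [PySem.List.pySetD_natCast, PySem.List.pyGetD_natCast]
            rw [hCsetprev (k - 1) (by omega), hCprev (k - 1) (by omega)]
            cases (pvMask a b ans)[k - 1]'(by omega) <;> rfl
          simp only [hdec, Bool.true_and, hpgprev]
          cases hprevv : (pvMask a b ans)[k - 1]'(by omega) with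
          | true =>
            have hcrpos : 1 ≤ (((pvMask a b ans).take k).foldl pvStep (0, 0)).1 := by
              have hprop : 0 < k ∧ (pvMask a b ans).getD (k - 1) false = true :=
                ⟨hkpos, by rw [List.getD_eq_getElem _ false (by omega)]; exact hprevv⟩
              have hne : (((pvMask a b ans).take k).foldl pvStep (0, 0)).1 ≠ 0 :=
                fun h0 => (hiff.mp h0) hprop
              omega
            simp only [reduceIte, Prod.mk.injEq]
            refine ⟨by simpa using hnewtrue hv, ?_, ?_, ?_⟩
              <;> first | trivial | omega | (split_ifs <;> omega)
          | false =>
            have hcr0 : (((pvMask a b ans).take k).foldl pvStep (0, 0)).1 = 0 := by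
              rw [hiff]
              rintro ⟨_, hgd⟩
              rw [List.getD_eq_getElem _ false (by omega)] at hgd
              rw [hprevv] at hgd
              exact Bool.false_ne_true hgd
            simp only [Bool.false_eq_true, reduceIte, Prod.mk.injEq]
            refine ⟨by simpa using hnewtrue hv, ?_, ?_, ?_⟩ <;> first | trivial | omega
      · constructor
        · intro h0; omega
        · intro hcontra
          exact absurd ⟨by omega, by trivial⟩ hcontra

-- A's per-pair score, in canonical form: count + (max run)²
lemma pvScore_eq (ans a b : List Int) (ha : ans.length ≤ a.length) (hb : ans.length ≤ b.length) :
    (let st := (PySem.List.pyRange 0 (ans.length : Int) 1).foldl (pvStepA ans a b)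
        (List.replicate ans.length 0, 0, 1, 1)
     let ma_pro : Int := if st.2.1 == 0 then 0 else st.2.2.2
     st.2.1 + ma_pro * ma_pro)
    = (let m := pvMask a b ans
       m.foldl (fun s x => s + (if x then (1 : Int) else 0)) 0 + pvG 0 m * pvG 0 m) := by
  have hm : (pvMask a b ans).length = ans.length := pvMask_length a b ans ha hb
  obtain ⟨hfold, -⟩ := pvInnerA_inv ans a b ha hb ans.length le_rfl
  have htake : (pvMask a b ans).take ans.length = pvMask a b ans := by
    rw [← hm]
    exact List.take_length
  rw [htake] at hfold
  simp only [hfold]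
  have hbs : ((pvMask a b ans).foldl pvStep (0, 0)).2 = pvG 0 (pvMask a b ans) := by
    rw [pvStep_foldl_best (pvMask a b ans) 0 0 le_rfl le_rfl]
    have := pvG_nonneg (pvMask a b ans) 0 le_rfl
    omega
  by_cases h0 : (pvMask a b ans).foldl (fun s x => s + (if x then (1 : Int) else 0)) 0 = 0
  · have hnot : true ∉ (pvMask a b ans) := (pvNum_zero_iff (pvMask a b ans)).mp h0
    have hG : pvG 0 (pvMask a b ans) = 0 :=
      pvG_of_all_false (pvMask a b ans)
        (fun x hx => by
          cases x with
          | false => rfl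
          | true => exact absurd hx hnot) 0
    simp [h0, hG]
  · have hmem : true ∈ (pvMask a b ans) := by
      by_contra hn
      exact h0 ((pvNum_zero_iff (pvMask a b ans)).mpr hn)
    have hG1 : 1 ≤ pvG 0 (pvMask a b ans) := pvG_pos_of_mem (pvMask a b ans) hmem 0 le_rfl
    have hmax : max 1 ((pvMask a b ans).foldl pvStep (0, 0)).2 = pvG 0 (pvMask a b ans) := by
      rw [hbs]; omega
    simp [h0, hmax]

-- ===== B-side lemmas: bitmask = pvEnc of the mask, popcount, shrink loop =====

lemma pvOr2 (v b : Nat) (hb : b ≤ 1) : (v <<< 1) ||| b = 2 * v + b := by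
  have hv : v <<< 1 = 2 * v := by rw [Nat.shiftLeft_eq]; ring
  rw [hv]
  interval_cases b
  · exact Nat.or_zero _
  · apply Nat.eq_of_testBit_eq
    intro i
    cases i with
    | zero => simp [Nat.testBit_zero, Nat.mul_add_mod_self_left]
    | succ i =>
      have h1 : (2 * v) / 2 = v := by omega
      have h2 : (2 * v + 1) / 2 = v := by omega
      rw [Nat.testBit_or]
      simp [Nat.testBit_add_one, h1, h2]

lemma pvPop_bit (b e : Nat) (hb : b ≤ 1) : pvPop (b + 2 * e) = b + pvPop e := by
  by_cases h : b + 2 * e = 0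
  · have hb0 : b = 0 := by omega
    have he0 : e = 0 := by omega
    subst hb0; subst he0
    simp [pvPop]
  · rw [pvPop]
    simp only [h, if_false]
    have h1 : (b + 2 * e) % 2 = b := by omega
    have h2 : (b + 2 * e) / 2 = e := by omega
    rw [h1, h2]

lemma pvPop_enc (m : List Bool) : pvPop (pvEnc m) = pvCnt m := by
  induction m with
  | nil => simp [pvEnc, pvCnt, pvPop]
  | cons x xs ih =>
    simp only [pvEnc, pvCnt]
    rw [pvPop_bit _ _ (by split <;> omega), ih]

lemma pvEnc_testBit (m : List Bool) : ∀ i : Nat, (pvEnc m).testBit i = m.getD i false := by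
  induction m with
  | nil => intro i; simp [pvEnc, Nat.zero_testBit]
  | cons x xs ih =>
    intro i
    cases i with
    | zero =>
      simp only [pvEnc, Nat.testBit_zero, List.getD_cons_zero]
      cases x <;> simp <;> omega
    | succ i =>
      have h2 : ((if x then 1 else 0) + 2 * pvEnc xs) / 2 = pvEnc xs := by split <;> omega
      simp only [pvEnc, Nat.testBit_add_one, h2, List.getD_cons_succ]
      exact ih i

lemma pvEnc_append (l : List Bool) (x : Bool) :
    pvEnc (l ++ [x]) = pvEnc l + (if x then 1 else 0) * 2 ^ l.length := by
  induction l with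
  | nil => simp [pvEnc]
  | cons y ys ih =>
    simp only [List.cons_append, pvEnc, ih, List.length_cons]
    ring

-- the reversed-range fold of Source B builds exactly pvEnc of the mask prefix
lemma pvBitfold (ans a b : List Int) (ha : ans.length ≤ a.length) (hb : ans.length ≤ b.length) :
    ∀ n, n ≤ ans.length → ∀ acc : Nat,
    ((List.range n).reverse).foldl
      (fun v (j : Nat) => (v <<< 1) |||
        (if (PySem.List.pyGetD a (j : Int) 0 == PySem.List.pyGetD b (j : Int) 0)
            && !(PySem.List.pyGetD a (j : Int) 0 == PySem.List.pyGetD ans (j : Int) 0)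
         then 1 else 0)) acc
      = acc * 2 ^ n + pvEnc ((pvMask a b ans).take n) := by
  have hm : (pvMask a b ans).length = ans.length := pvMask_length a b ans ha hb
  intro n
  induction n with
  | zero => intro _ acc; simp [pvEnc]
  | succ k ih =>
    intro hk1 acc
    have hk : k < ans.length := by omega
    have hkm : k < (pvMask a b ans).length := by omega
    have hga : PySem.List.pyGetD a (k : Int) 0 = a[k]'(by omega) := by
      simp [List.getElem?_eq_getElem (show k < a.length by omega)]
    have hgb : PySem.List.pyGetD b (k : Int) 0 = b[k]'(by omega) := by
      simp [List.getElem?_eq_getElem (show k < b.length by omega)]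
    have hgans : PySem.List.pyGetD ans (k : Int) 0 = ans[k]'hk := by
      simp [List.getElem?_eq_getElem hk]
    have hhit : ((PySem.List.pyGetD a (k : Int) 0 == PySem.List.pyGetD b (k : Int) 0)
        && !(PySem.List.pyGetD a (k : Int) 0 == PySem.List.pyGetD ans (k : Int) 0))
        = (pvMask a b ans)[k]'hkm := by
      rw [hga, hgb, hgans, pvMask_getElem a b ans ha hb k hk]
    rw [List.range_succ, List.reverse_append]
    simp only [List.reverse_singleton, List.singleton_append, List.foldl_cons]
    rw [ih (by omega)]
    rw [hhit]
    rw [pvOr2 _ _ (by split <;> omega)]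
    have htake : (pvMask a b ans).take (k + 1)
        = (pvMask a b ans).take k ++ [(pvMask a b ans)[k]] :=
      List.take_succ_eq_append_getElem hkm
    rw [htake, pvEnc_append]
    have hlen : ((pvMask a b ans).take k).length = k := by simp; omega
    rw [hlen]
    ring

-- ===== run characterizations =====

lemma pvHasRun_zero (v : Nat) : pvHasRun v 0 :=
  ⟨0, fun i hi => absurd hi (Nat.not_lt_zero i)⟩

lemma pvHR_zero (r : Nat) (m : List Bool) : pvHR r m 0 :=
  ⟨r + 1, by omega, fun i hi => absurd hi (Nat.not_lt_zero i)⟩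

lemma pvRepl_lt (r : Nat) (m : List Bool) (p : Nat) (h : p < r) :
    (List.replicate r true ++ m).getD p false = true := by
  rw [List.getD_append _ _ _ _ (by simpa using h)]
  simp [h]

lemma pvRepl_ge (r : Nat) (m : List Bool) (p : Nat) (h : r ≤ p) :
    (List.replicate r true ++ m).getD p false = m.getD (p - r) false := by
  have := List.getD_append_right (List.replicate r true) m false p (by simpa using h)
  simpa using this

-- step of the shrink loop at the bit level
lemma pvAndShift_testBit (v j : Nat) :
    (v &&& (v >>> 1)).testBit j = (v.testBit j && v.testBit (j + 1)) := by
  rw [Nat.testBit_and, Nat.testBit_shiftRight]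
  congr 2
  omega

lemma pvRunStep (v k : Nat) (hv : v ≠ 0) :
    pvHasRun (v &&& (v >>> 1)) k ↔ pvHasRun v (k + 1) := by
  constructor
  · rintro ⟨j, h⟩
    cases k with
    | zero =>
      obtain ⟨i, hi⟩ := Nat.exists_testBit_of_ne_zero hv
      exact ⟨i, fun t ht => by
        have : t = 0 := by omega
        subst this
        simpa using hi⟩
    | succ k' =>
      refine ⟨j, fun i hi => ?_⟩
      by_cases hik : i < k' + 1
      · have := h i hik
        rw [pvAndShift_testBit] at this
        simp only [Bool.and_eq_true] at this
        exact this.1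
      · have hik' : i = k' + 1 := by omega
        have := h k' (by omega)
        rw [pvAndShift_testBit] at this
        simp only [Bool.and_eq_true] at this
        have h2 := this.2
        subst hik'
        have : j + (k' + 1) = j + k' + 1 := by omega
        rw [this]
        exact h2
  · rintro ⟨j, h⟩
    refine ⟨j, fun i hi => ?_⟩
    rw [pvAndShift_testBit]
    simp only [Bool.and_eq_true]
    refine ⟨h i (by omega), ?_⟩
    have := h (i + 1) (by omega)
    have he : j + (i + 1) = j + i + 1 := by omega
    rw [he] at this
    exact this

lemma pvShrink_char (v : Nat) : ∀ k, pvHasRun v k ↔ k ≤ pvShrink v := by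
  induction v using Nat.strong_induction_on with
  | _ v ih =>
    intro k
    by_cases hv : v = 0
    · subst hv
      have h0 : pvShrink 0 = 0 := by simp [pvShrink]
      rw [h0]
      cases k with
      | zero => simp [pvHasRun_zero]
      | succ k' =>
        constructor
        · rintro ⟨j, h⟩
          have := h 0 (by omega)
          simp [Nat.zero_testBit] at this
        · omega
    · have hlt : v &&& (v >>> 1) < v :=
        calc v &&& (v >>> 1) ≤ v >>> 1 := Nat.and_le_right
          _ = v / 2 := Nat.shiftRight_one v
          _ < v := Nat.div_lt_self (Nat.pos_of_ne_zero hv) (by norm_num)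
      rw [pvShrink]
      simp only [hv, dite_false]
      cases k with
      | zero => simp [pvHasRun_zero]
      | succ k' =>
        rw [← pvRunStep v k' hv, ih _ hlt k']
        omega

-- pvGN with credit c = windows in (replicate c true ++ m) reaching past the phantom prefix
lemma pvGN_char (m : List Bool) : ∀ c k : Nat, k ≤ pvGN c m ↔ (k = 0 ∨ pvHR c m k) := by
  induction m with
  | nil =>
    intro c k
    simp only [pvGN, Nat.le_zero]
    constructor
    · intro h; exact Or.inl h
    · rintro (h | ⟨j, hjk, h⟩)
      · exact h
      · cases k with
        | zero => rfl
        | succ k' =>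
          exfalso
          have hgd := h k' (by omega)
          have hge : c ≤ j + k' := by omega
          rw [pvRepl_ge c [] (j + k') hge] at hgd
          simp at hgd
  | cons x xs ih =>
    intro c k
    cases x
    · -- x = false
      have hequiv : pvHR c (false :: xs) k ↔ pvHR 0 xs k := by
        cases k with
        | zero => simp [pvHR_zero]
        | succ k' =>
          constructor
          · rintro ⟨j, hjk, h⟩
            have hj : c + 1 ≤ j := by
              by_contra hc
              push_neg at hc
              have hik : c - j < k' + 1 := by omega
              have := h (c - j) hik
              have he : j + (c - j) = c := by omega
              rw [he, pvRepl_ge c (false :: xs) c le_rfl] at this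
              simp at this
            refine ⟨j - (c + 1), by omega, fun i hi => ?_⟩
            have hgd := h i hi
            rw [pvRepl_ge c (false :: xs) (j + i) (by omega)] at hgd
            have he : j + i - c = (j - (c + 1) + i) + 1 := by omega
            rw [he, List.getD_cons_succ] at hgd
            simpa using hgd
          · rintro ⟨j', hjk', h⟩
            refine ⟨j' + c + 1, by omega, fun i hi => ?_⟩
            have hgd := h i hi
            simp only [List.replicate_zero, List.nil_append] at hgd
            rw [pvRepl_ge c (false :: xs) (j' + c + 1 + i) (by omega)]
            have he : j' + c + 1 + i - c = (j' + i) + 1 := by omega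
            rw [he, List.getD_cons_succ]
            exact hgd
      simp only [pvGN]
      rw [ih 0 k, hequiv]
    · -- x = true
      have hL : List.replicate c true ++ true :: xs = List.replicate (c + 1) true ++ xs := by
        rw [List.replicate_succ', List.append_assoc]
        rfl
      have hequiv : pvHR c (true :: xs) k ↔ ((1 ≤ k ∧ k ≤ c + 1) ∨ pvHR (c + 1) xs k) := by
        cases k with
        | zero => simp [pvHR_zero]
        | succ k' =>
          constructor
          · rintro ⟨j, hjk, h⟩
            by_cases hge : c + 2 ≤ j + (k' + 1)
            · right
              refine ⟨j, hge, fun i hi => ?_⟩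
              rw [← hL]
              exact h i hi
            · left
              exact ⟨by omega, by omega⟩
          · rintro (⟨hk1, hkc⟩ | ⟨j, hjk, h⟩)
            · refine ⟨c + 1 - (k' + 1), by omega, fun i hi => ?_⟩
              rw [hL]
              exact pvRepl_lt (c + 1) xs _ (by omega)
            · refine ⟨j, by omega, fun i hi => ?_⟩
              rw [hL]
              exact h i hi
      simp only [pvGN]
      rw [le_max_iff, ih (c + 1) k, hequiv]
      cases k with
      | zero => simp
      | succ k' =>
        constructor
        · rintro (h | h | h)
          · exact Or.inr (Or.inl ⟨by omega, h⟩)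
          · omega
          · exact Or.inr (Or.inr h)
        · rintro (h | ⟨h1, h2⟩ | h)
          · omega
          · exact Or.inl h2
          · exact Or.inr (Or.inr h)

lemma pvRun_transfer (m : List Bool) (k : Nat) :
    pvHasRun (pvEnc m) k ↔ (k = 0 ∨ pvHR 0 m k) := by
  cases k with
  | zero => simp [pvHasRun_zero]
  | succ k' =>
    constructor
    · rintro ⟨j, h⟩
      refine Or.inr ⟨j, by omega, fun i hi => ?_⟩
      simp only [List.replicate_zero, List.nil_append]
      rw [← pvEnc_testBit]
      exact h i hi
    · rintro (h | ⟨j, hjk, h⟩)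
      · omega
      · refine ⟨j, fun i hi => ?_⟩
        rw [pvEnc_testBit]
        have := h i hi
        simpa using this
lemma pvShrink_enc (m : List Bool) : pvShrink (pvEnc m) = pvGN 0 m := by
  apply Nat.le_antisymm
  · rw [pvGN_char m 0]
    rw [← pvRun_transfer]
    exact (pvShrink_char (pvEnc m) _).mpr le_rfl
  · rw [← pvShrink_char]
    rw [pvRun_transfer]
    exact (pvGN_char m 0 _).mp le_rfl

lemma pvG_eq_gN (m : List Bool) : ∀ c : Nat, pvG (c : Int) m = (pvGN c m : Int) := by
  induction m with
  | nil => intro c; simp [pvG, pvGN]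
  | cons x xs ih =>
    intro c
    cases x
    · simpa [pvG, pvGN] using ih 0
    · have := ih (c + 1)
      simp only [pvG, pvGN]
      push_cast at this ⊢
      rw [← this]

-- B's per-pair score, in the same canonical form
lemma pvScoreB_eq (ans a b : List Int) (ha : ans.length ≤ a.length) (hb : ans.length ≤ b.length) :
    pvPairScoreB ans a b
    = (let m := pvMask a b ans
       m.foldl (fun s x => s + (if x then (1 : Int) else 0)) 0 + pvG 0 m * pvG 0 m) := by
  unfold pvPairScoreB
  have hm : (pvMask a b ans).length = ans.length := pvMask_length a b ans ha hb
  have hv : ((PySem.List.pyRange 0 (ans.length : Int) 1).reverse).foldl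
      (fun v j => (v <<< 1) |||
        (if (PySem.List.pyGetD a j 0 == PySem.List.pyGetD b j 0)
            && !(PySem.List.pyGetD a j 0 == PySem.List.pyGetD ans j 0)
         then 1 else 0)) 0 = pvEnc (pvMask a b ans) := by
    rw [PySem.List.pyRange_zero_natCast, ← List.map_reverse, List.foldl_map]
    have := pvBitfold ans a b ha hb ans.length le_rfl 0
    rw [this]
    rw [show (pvMask a b ans).take ans.length = pvMask a b ans from by
      rw [← hm]; exact List.take_length]
    omega
  simp only [hv]
  rw [pvPop_enc, pvShrink_enc, pvNumFold_cnt]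
  have : pvG ((0 : Nat) : Int) (pvMask a b ans) = (pvGN 0 (pvMask a b ans) : Int) :=
    pvG_eq_gN (pvMask a b ans) 0
  simp only [Nat.cast_zero] at this
  rw [this]

-- ===== VERDICT (by name: the statement is the Claim_ definition above) =====
theorem solution_spec : Claim_equal_solution := by
  intro ans sheets _ hpre
  unfold Spec_solution solution solution_alt
  rw [PySem.List.foldl_pyRange_zero_pyGetD' (PySem.List.combinations sheets 2) []
    (fun answer c =>
      let a := PySem.List.pyGetD c 0 []
      let b := PySem.List.pyGetD c 1 []
      let st := (PySem.List.pyRange 0 (ans.length : Int) 1).foldl (pvStepA ans a b)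
        (List.replicate ans.length 0, 0, 1, 1)
      let ma_pro := if st.2.1 == 0 then 0 else st.2.2.2
      let loc := st.2.1 + ma_pro * ma_pro
      if loc > answer then loc else answer) 0]
  refine PySem.List.foldl_congr_mem _ _ _ _ ?_
  intro acc c hc
  obtain ⟨hsub, hlen2⟩ := (PySem.List.mem_combinations_iff sheets 2 c).mp hc
  -- a 2-combination is a 2-element list of sheets
  match c, hlen2 with
  | [x, y], _ =>
    have hx : x ∈ sheets := hsub.subset (by simp)
    have hy : y ∈ sheets := hsub.subset (by simp)
    have hsl : 2 ≤ sheets.length := by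
      have := hsub.length_le
      simpa using this
    have hxl : ans.length ≤ x.length := hpre hsl x hx
    have hyl : ans.length ≤ y.length := hpre hsl y hy
    have hget0 : PySem.List.pyGetD [x, y] (0 : Int) ([] : List Int) = x := rfl
    have hget1 : PySem.List.pyGetD [x, y] (1 : Int) ([] : List Int) = y := rfl
    simp only [hget0, hget1, List.headD_cons, List.tail_cons]
    have hscoreA := pvScore_eq ans x y hxl hyl
    have hscoreB := pvScoreB_eq ans x y hxl hyl
    simp only at hscoreA hscoreB
    rw [hscoreA, hscoreB]
    split_ifs <;> omega
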